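-- pv_equiv track=rewrite | github.com/abidkhan484/hacerrankScraping | scrapeHackerrankCode/codes/special-multiple289.py | make_multi
-- ===== SOURCE A (Python) =====
-- def make_multi(i):
--     li = []
--     while i:
--         if i%2==1:
--             li.append(9)
--         else:
--             li.append(0)
--         i //= 2
--     li.reverse()
--
--     total = 0
--     for i in li:
--         total = total*10 + i
--     return total
-- ===== SOURCE B (Python) =====
-- def make_multi(i):
--     # Recursive closed form: each binary digit of i becomes a decimal digit 9 or 0.
--     if i <= 0:
--         return 0
--     return 10 * make_multi(i // 2) + 9 * (i % 2)
-- ===== Notes on version B (the rewrite author's own statement) =====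
-- stated objective: simpler
-- what changed: Replaces A's two-pass scheme (build the LSB-first digit list, reverse it, then a Horner fold) by a direct arithmetic recursion on the halved argument, with no list at all.
import Mathlib
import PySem

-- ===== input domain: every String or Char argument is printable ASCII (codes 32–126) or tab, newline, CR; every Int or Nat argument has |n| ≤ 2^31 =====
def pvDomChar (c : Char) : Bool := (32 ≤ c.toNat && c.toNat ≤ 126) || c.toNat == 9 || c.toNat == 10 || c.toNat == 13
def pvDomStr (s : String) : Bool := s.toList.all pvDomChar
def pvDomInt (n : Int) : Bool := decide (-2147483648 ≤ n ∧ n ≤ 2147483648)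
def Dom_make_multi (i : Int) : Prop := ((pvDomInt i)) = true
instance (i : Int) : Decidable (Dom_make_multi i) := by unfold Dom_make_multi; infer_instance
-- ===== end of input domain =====

-- B replaces A's list-build + reverse + Horner fold by a direct arithmetic recursion on the halved argument (objective: simpler).

-- ===== PORT A =====
-- A's 'while i' loop; the 0 < i guard is the totality guard (on Pre_, i ≥ 0, 'i ≠ 0' and '0 < i' coincide;
-- for negative i the Python loop never terminates, which Pre_ excludes).
def pvALoop (i : Int) (li : List Int) : List Int :=
  if h : 0 < i then
    pvALoop (PySem.Int.floordiv i 2)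
      (li ++ [if PySem.Int.mod i 2 = 1 then (9 : Int) else 0])
  else li
termination_by i.toNat
decreasing_by
  have := PySem.Int.floordiv_eq_ediv_of_pos (a := i) (b := 2) (by omega)
  omega

def make_multi (i : Int) : Int :=
  let li := (pvALoop i []).reverse
  li.foldl (fun total d => total * 10 + d) 0

-- ===== PORT B =====
def make_multi_alt (i : Int) : Int :=
  if h : i ≤ 0 then 0
  else 10 * make_multi_alt (PySem.Int.floordiv i 2) + 9 * PySem.Int.mod i 2
termination_by i.toNat
decreasing_by
  have := PySem.Int.floordiv_eq_ediv_of_pos (a := i) (b := 2) (by omega)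
  omega

-- ===== PRECONDITION & SPEC =====
-- Pre_ excludes negative i, on which A's 'while i' loop never terminates (i //= 2 stabilises at -1); A returns on no excluded input.
def Pre_make_multi (i : Int) : Prop := 0 ≤ i
instance (i : Int) : Decidable (Pre_make_multi i) := by unfold Pre_make_multi; infer_instance
def pvWitness_make_multi : Int := 5

def Spec_make_multi (i : Int) (out : Int) : Prop := out = make_multi_alt i
instance (i : Int) (out : Int) : Decidable (Spec_make_multi i out) := by unfold Spec_make_multi; infer_instance

-- ===== CLAIM (what is proved, stated in full; the proofs are below) =====
def Claim_equal_make_multi : Prop := ∀ (i : Int), Dom_make_multi i → Pre_make_multi i → Spec_make_multi i (make_multi i)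

-- ===== LEMMAS AND PROOFS =====

theorem pvALoop_stop {i : Int} (h : ¬ 0 < i) (li : List Int) : pvALoop i li = li := by
  rw [pvALoop]; simp [h]

theorem pvALoop_step {i : Int} (h : 0 < i) (li : List Int) :
    pvALoop i li = pvALoop (PySem.Int.floordiv i 2)
      (li ++ [if PySem.Int.mod i 2 = 1 then (9 : Int) else 0]) := by
  rw [pvALoop]; simp [h]

theorem pvALoop_append (n : Nat) : ∀ (i : Int), i.toNat ≤ n → ∀ (li : List Int),
    pvALoop i li = li ++ pvALoop i [] := by
  induction n with
  | zero =>
    intro i hi li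
    have hnp : ¬ 0 < i := by omega
    rw [pvALoop_stop hnp, pvALoop_stop hnp]
    simp
  | succ n ih =>
    intro i hi li
    by_cases hp : 0 < i
    · have hdiv := PySem.Int.floordiv_eq_ediv_of_pos (a := i) (b := 2) (by omega)
      have hle : (PySem.Int.floordiv i 2).toNat ≤ n := by omega
      rw [pvALoop_step hp li, pvALoop_step hp []]
      rw [ih _ hle, ih _ hle (li := [] ++ _)]
      simp
    · rw [pvALoop_stop hp, pvALoop_stop hp]
      simp

theorem pvMain (n : Nat) : ∀ (i : Int), i.toNat ≤ n → 0 ≤ i →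
    ((pvALoop i []).reverse).foldl (fun total d => total * 10 + d) 0 = make_multi_alt i := by
  induction n with
  | zero =>
    intro i hi h0
    have hz : i = 0 := by omega
    subst hz
    rw [pvALoop_stop (by omega), make_multi_alt]
    simp
  | succ n ih =>
    intro i hi h0
    by_cases hp : 0 < i
    · have hdiv := PySem.Int.floordiv_eq_ediv_of_pos (a := i) (b := 2) (by omega)
      have hmod := PySem.Int.mod_eq_emod_of_pos (a := i) (b := 2) (by omega)
      have hle : (PySem.Int.floordiv i 2).toNat ≤ n := by omega
      have h0' : 0 ≤ PySem.Int.floordiv i 2 := by omega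
      rw [pvALoop_step hp, List.nil_append, pvALoop_append _ _ hle]
      rw [List.reverse_append, List.foldl_append]
      rw [ih _ hle h0']
      have hnle : ¬ i ≤ 0 := by omega
      conv_rhs => rw [make_multi_alt]
      rw [dif_neg hnle]
      have : PySem.Int.mod i 2 = 0 ∨ PySem.Int.mod i 2 = 1 := by omega
      rcases this with h | h <;> rw [h] <;> simp <;> ring
    · have hz : i = 0 := by omega
      subst hz
      rw [pvALoop_stop (by omega), make_multi_alt]
      norm_num

-- ===== VERDICT (by name: the statement is the Claim_ definition above) =====
theorem make_multi_spec : Claim_equal_make_multi := by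
  intro i _ hpre
  unfold Spec_make_multi make_multi
  exact pvMain i.toNat i le_rfl hpre
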